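-- pv_equiv track=rewrite | github.com/fsglobal/Validador_Promociones | web/app.py | _extraer_productos_y_detalle
-- ===== SOURCE A (Python) =====
-- def _extraer_productos_y_detalle(texto):
--     base = str(texto or "-").strip()
--     if not base or base == "-":
--         return "-", "-"
--
--     partes = [p.strip() for p in base.split("|") if p.strip()]
--     if not partes:
--         return "-", "-"
--
--     producto = "-"
--     detalle = []
--
--     for parte in partes:
--         lower = parte.lower()
--         if lower.startswith("sku:") or lower.startswith("lista:"):
--             if producto == "-":
--                 producto = parte
--             else:
--                 detalle.append(parte)
--         else:
--             detalle.append(parte)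
--
--     detalle_txt = " | ".join(detalle) if detalle else "-"
--     return producto, detalle_txt
-- ===== SOURCE B (Python) =====
-- def _extraer_productos_y_detalle(texto):
--     base = str(texto or "-").strip()
--     if not base or base == "-":
--         return "-", "-"
--
--     def limpiar(piezas):
--         return [q for q in (x.strip() for x in piezas) if q]
--
--     def go(piezas):
--         # recursion over the raw split pieces: skip blanks, first sku:/lista:
--         # piece is the product and everything after it (cleaned) is detail
--         if not piezas:
--             return "-", []
--         p = piezas[0].strip()
--         if not p:
--             return go(piezas[1:])
--         if p.lower().startswith(("sku:", "lista:")):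
--             return p, limpiar(piezas[1:])
--         prod, det = go(piezas[1:])
--         return prod, [p] + det
--
--     producto, detalle = go(base.split("|"))
--     return producto, (" | ".join(detalle) if detalle else "-")
-- ===== Notes on version B (the rewrite author's own statement) =====
-- stated objective: alternative
-- what changed: A's flag-driven fold that first builds a cleaned parts list and then classifies each part is replaced by a direct recursion over the raw split pieces that skips blanks inline, stops at the first sku:/lista: piece (everything after it is cleaned wholesale into the detail) and otherwise prepends the piece to the recursive result; the separate empty-parts early return disappears.
import Mathlib
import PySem

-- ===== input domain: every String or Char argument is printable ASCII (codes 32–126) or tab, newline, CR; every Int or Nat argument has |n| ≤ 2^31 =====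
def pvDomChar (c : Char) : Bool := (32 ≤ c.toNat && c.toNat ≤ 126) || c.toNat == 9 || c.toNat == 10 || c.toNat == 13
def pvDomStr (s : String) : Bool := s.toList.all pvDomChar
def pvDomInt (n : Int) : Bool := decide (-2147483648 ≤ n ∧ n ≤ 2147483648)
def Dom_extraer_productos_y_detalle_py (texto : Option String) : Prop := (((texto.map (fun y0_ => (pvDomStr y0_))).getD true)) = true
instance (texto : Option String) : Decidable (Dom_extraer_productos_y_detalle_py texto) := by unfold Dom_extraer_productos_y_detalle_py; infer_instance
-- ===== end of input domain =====

-- B replaces A's clean-then-fold pipeline (build partes, flag-driven accumulating loop, empty-partes early return) by a single recursion over the raw split pieces; objective: alternative.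


-- ===== PORT A =====
-- one step of A's loop over partes: state = (producto, detalle)
def pvStepA (st : String × List String) (parte : String) : String × List String :=
  let lower := PySem.Str.lower parte
  if (PySem.Str.startswith lower "sku:" || PySem.Str.startswith lower "lista:") = true then
    if st.1 = "-" then (parte, st.2) else (st.1, st.2 ++ [parte])
  else (st.1, st.2 ++ [parte])

def extraer_productos_y_detalle_py (texto : Option String) : String × String :=
  -- str(texto or "-"): None and "" are falsy
  let base := PySem.Str.strip (match texto with | none => "-" | some s => if s = "" then "-" else s)
  if base = "" ∨ base = "-" then ("-", "-")
  else
    -- base.split("|"): split? is some because the separator is nonempty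
    let partes := (((PySem.Str.split? base "|").getD []).map PySem.Str.strip).filter (· ≠ "")
    if partes = [] then ("-", "-")
    else
      let st := partes.foldl pvStepA ("-", [])
      (st.1, if st.2.isEmpty then "-" else PySem.Str.join " | " st.2)

-- ===== PORT B =====
-- Source B's predicate p.lower().startswith(("sku:", "lista:"))
def pvEsProducto (p : String) : Bool :=
  PySem.Str.startswith (PySem.Str.lower p) "sku:" || PySem.Str.startswith (PySem.Str.lower p) "lista:"

-- Source B's limpiar: [q for q in (x.strip() for x in piezas) if q]
def pvLimpiar (piezas : List String) : List String :=
  (piezas.map PySem.Str.strip).filter (· ≠ "")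

-- Source B's go: recursion over the raw split pieces
def pvGo : List String → String × List String
  | [] => ("-", [])
  | x :: rest =>
    let p := PySem.Str.strip x
    if p = "" then pvGo rest
    else if pvEsProducto p then (p, pvLimpiar rest)
    else
      let pd := pvGo rest
      (pd.1, p :: pd.2)

def extraer_productos_y_detalle_py_alt (texto : Option String) : String × String :=
  let base := PySem.Str.strip (match texto with | none => "-" | some s => if s = "" then "-" else s)
  if base = "" ∨ base = "-" then ("-", "-")
  else
    let pd := pvGo ((PySem.Str.split? base "|").getD [])
    (pd.1, if pd.2.isEmpty then "-" else PySem.Str.join " | " pd.2)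

-- ===== PRECONDITION & SPEC =====
def Spec_extraer_productos_y_detalle_py (texto : Option String) (out : String × String) : Prop := out = extraer_productos_y_detalle_py_alt texto
instance (texto : Option String) (out : String × String) : Decidable (Spec_extraer_productos_y_detalle_py texto out) := by unfold Spec_extraer_productos_y_detalle_py; infer_instance

-- ===== CLAIM (what is proved, stated in full; the proofs are below) =====
def Claim_equal_extraer_productos_y_detalle_py : Prop := ∀ (texto : Option String), Dom_extraer_productos_y_detalle_py texto → Spec_extraer_productos_y_detalle_py texto (extraer_productos_y_detalle_py texto)

-- ===== LEMMAS AND PROOFS =====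

theorem pvStepA_eq (st : String × List String) (parte : String) :
    pvStepA st parte =
      if pvEsProducto parte = true then
        if st.1 = "-" then (parte, st.2) else (st.1, st.2 ++ [parte])
      else (st.1, st.2 ++ [parte]) := rfl

-- a part that matches the search predicate starts with 's'/'S'/'l'/'L', so it is never "-"
theorem pvEsProducto_ne_dash {p : String} (hp : pvEsProducto p = true) : p ≠ "-" := by
  intro he; rw [he] at hp; exact absurd hp (by decide)

-- once producto is set (≠ "-"), A's loop only appends to detalle
theorem pvFoldA_set (l : List String) (p : String) (acc : List String) (hp : p ≠ "-") :
    l.foldl pvStepA (p, acc) = (p, acc ++ l) := by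
  induction l generalizing acc with
  | nil => simp
  | cons h t ih =>
    rw [List.foldl_cons, pvStepA_eq]
    by_cases hh : pvEsProducto h = true
    · rw [if_pos hh, if_neg hp, ih]; simp
    · rw [if_neg hh, ih]; simp

-- A's fold over the cleaned pieces computes exactly B's recursion over the raw pieces
theorem pvFoldA_eq_go (pieces : List String) (acc : List String) :
    (pvLimpiar pieces).foldl pvStepA ("-", acc) = ((pvGo pieces).1, acc ++ (pvGo pieces).2) := by
  induction pieces generalizing acc with
  | nil => simp [pvLimpiar, pvGo]
  | cons x rest ih =>
    by_cases hp : PySem.Str.strip x = ""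
    · have hl : pvLimpiar (x :: rest) = pvLimpiar rest := by
        simp [pvLimpiar, hp]
      rw [hl, ih, pvGo]
      simp [hp]
    · have hl : pvLimpiar (x :: rest) = PySem.Str.strip x :: pvLimpiar rest := by
        simp [pvLimpiar, hp]
      rw [hl, List.foldl_cons, pvStepA_eq]
      by_cases hh : pvEsProducto (PySem.Str.strip x) = true
      · rw [if_pos hh, if_pos rfl,
          pvFoldA_set _ _ _ (pvEsProducto_ne_dash hh)]
        simp [pvGo, hp, hh]
      · rw [if_neg hh, ih]
        simp [pvGo, hp, hh]

-- ===== VERDICT (by name: the statement is the Claim_ definition above) =====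
theorem extraer_productos_y_detalle_py_spec : Claim_equal_extraer_productos_y_detalle_py := by
  intro texto _
  unfold Spec_extraer_productos_y_detalle_py extraer_productos_y_detalle_py extraer_productos_y_detalle_py_alt
  cases texto with
  | none => rfl
  | some s =>
    by_cases hs : s = ""
    · subst hs; rfl
    · simp only [if_neg hs]
      by_cases h1 : PySem.Str.strip s = "" ∨ PySem.Str.strip s = "-"
      · rw [if_pos h1, if_pos h1]
      · rw [if_neg h1, if_neg h1]
        set pieces := (PySem.Str.split? (PySem.Str.strip s) "|").getD [] with hpieces
        by_cases h2 : (pieces.map PySem.Str.strip).filter (· ≠ "") = []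
        · rw [if_pos h2]
          have hgo : pvGo pieces = ("-", []) := by
            have := pvFoldA_eq_go pieces []
            rw [show pvLimpiar pieces = [] from h2] at this
            simp at this
            exact this.symm
          simp [hgo]
        · rw [if_neg h2]
          have := pvFoldA_eq_go pieces []
          simp only [List.nil_append] at this
          show ((((pieces.map PySem.Str.strip).filter (· ≠ "")).foldl pvStepA ("-", [])).1, _) = _
          rw [show (pieces.map PySem.Str.strip).filter (· ≠ "") = pvLimpiar pieces from rfl, this]
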